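-- pv_equiv track=rewrite | github.com/plhosk/wordtracer | scripts/analyze_levels_bundle.py | repeated_rows_for_segment
-- ===== SOURCE A (Python) =====
-- from collections import Counter
--
-- def level_code(
--     level_id: str,
--     level_to_group_id: dict[str, str],
--     level_to_group_pos: dict[str, int],
-- ) -> str:
--     group_id = level_to_group_id.get(level_id, "?")
--     position = level_to_group_pos.get(level_id)
--     if position is not None:
--         return f"{group_id}{position}"
--     return f"{group_id}#{level_id}"
--
-- def level_code_sort_key(code: str) -> tuple[str, int, str]:
--     group = ""
--     index = 0
--     while index < len(code) and code[index].isalpha():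
--         group += code[index]
--         index += 1
--     suffix = code[index:]
--     if suffix.isdigit():
--         return group, int(suffix), code
--     return group, 1_000_000_000, code
--
-- def repeated_rows_for_segment(
--     level_ids: list[str],
--     item_lists_by_level: dict[str, list[str]],
--     level_to_group_id: dict[str, str],
--     level_to_group_pos: dict[str, int],
-- ) -> list[tuple[str, int, list[str]]]:
--     item_counts: Counter[str] = Counter()
--     item_level_codes: dict[str, set[str]] = {}
--     for level_id in level_ids:
--         items = item_lists_by_level.get(level_id, [])
--         if not items:
--             continue
--         code = level_code(level_id, level_to_group_id, level_to_group_pos)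
--         for item in items:
--             item_counts[item] += 1
--             item_level_codes.setdefault(item, set()).add(code)
--
--     rows = [
--         (
--             item,
--             count,
--             sorted(item_level_codes.get(item, set()), key=level_code_sort_key),
--         )
--         for item, count in item_counts.items()
--         if count > 1
--     ]
--     rows.sort(key=lambda row: (-row[1], row[0]))
--     return rows
-- ===== SOURCE B (Python) =====
-- def level_code(level_id, level_to_group_id, level_to_group_pos):
--     group_id = level_to_group_id.get(level_id, "?")
--     position = level_to_group_pos.get(level_id)
--     if position is not None:
--         return f"{group_id}{position}"
--     return f"{group_id}#{level_id}"
--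
--
-- def level_code_sort_key(code):
--     group = ""
--     index = 0
--     while index < len(code) and code[index].isalpha():
--         group += code[index]
--         index += 1
--     suffix = code[index:]
--     if suffix.isdigit():
--         return group, int(suffix), code
--     return group, 1_000_000_000, code
--
--
-- def repeated_rows_for_segment(level_ids, item_lists_by_level, level_to_group_id, level_to_group_pos):
--     # Brute-force rescanning: no Counter and no dict at all.  Flatten the levels
--     # into one (item, code) occurrence list; at each FIRST occurrence of an item
--     # derive its count and its deduplicated codes by rescanning that flat list.
--     occ = []
--     for level_id in level_ids:
--         code = level_code(level_id, level_to_group_id, level_to_group_pos)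
--         for item in item_lists_by_level.get(level_id, []):
--             occ.append((item, code))
--     items = [p[0] for p in occ]
--     rows = []
--     for idx, (item, _code) in enumerate(occ):
--         if items.index(item) != idx:
--             continue  # not the first occurrence of this item
--         count = items.count(item)
--         if count > 1:
--             codes = []
--             for it2, c2 in occ:
--                 if it2 == item and c2 not in codes:
--                     codes.append(c2)
--             rows.append((item, count, sorted(codes, key=level_code_sort_key)))
--     rows.sort(key=lambda row: (-row[1], row[0]))
--     return rows
-- ===== Notes on version B (the rewrite author's own statement) =====
-- stated objective: alternative
-- what changed: Drops A's Counter and dict-of-sets entirely: B flattens the levels into one (item, code) occurrence list and, at each item's first occurrence, derives the count and the deduplicated codes by rescanning that flat list (index/count/filter brute force instead of hash aggregation).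
import Mathlib
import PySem

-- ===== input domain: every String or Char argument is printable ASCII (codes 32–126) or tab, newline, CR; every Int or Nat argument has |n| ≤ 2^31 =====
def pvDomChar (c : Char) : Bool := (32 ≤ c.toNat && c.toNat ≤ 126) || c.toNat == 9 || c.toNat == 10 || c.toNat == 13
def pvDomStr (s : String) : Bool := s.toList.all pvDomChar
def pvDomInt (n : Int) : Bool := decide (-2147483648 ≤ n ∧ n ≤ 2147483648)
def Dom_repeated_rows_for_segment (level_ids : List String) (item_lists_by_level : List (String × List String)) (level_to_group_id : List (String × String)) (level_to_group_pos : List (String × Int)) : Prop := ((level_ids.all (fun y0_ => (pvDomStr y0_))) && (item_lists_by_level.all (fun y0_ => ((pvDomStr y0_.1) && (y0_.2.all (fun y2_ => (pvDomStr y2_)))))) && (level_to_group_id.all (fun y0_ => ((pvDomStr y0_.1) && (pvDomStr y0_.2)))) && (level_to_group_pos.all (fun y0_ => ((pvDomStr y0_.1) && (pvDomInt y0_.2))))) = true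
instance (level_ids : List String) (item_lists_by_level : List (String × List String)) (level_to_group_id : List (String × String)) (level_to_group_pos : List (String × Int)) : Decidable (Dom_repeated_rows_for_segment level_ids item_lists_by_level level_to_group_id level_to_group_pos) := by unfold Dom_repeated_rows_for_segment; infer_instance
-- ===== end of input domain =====

-- B replaces A's Counter + dict-of-sets aggregation with a dict-free brute force: one flat occurrence list, rescanned at each first occurrence for count and codes (alternative decomposition; quadratic, not claimed faster).


-- ===== PORT A =====
-- shared module helpers (transliterations of level_code / level_code_sort_key)
def pvLevelCode (level_id : String) (gid : PySem.Dict String String) (gpos : PySem.Dict String Int) : String :=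
  let group_id := gid.getD level_id "?"
  match gpos.get? level_id with
  | some p => group_id ++ PySem.Int.toStr p
  | none => group_id ++ "#" ++ level_id

-- the while loop of level_code_sort_key: consume leading alphabetic chars into `group`
def pvSortKeyAux : List Char → String → String × List Char
  | [], g => (g, [])
  | c :: rest, g => if PySem.Chars.isalpha c then pvSortKeyAux rest (g.push c) else (g, c :: rest)

-- the key tuple is (group, int, code); int(suffix) is guarded by isdigit, so the total getD-form is exact
def pvKeyGroup (code : String) : String := (pvSortKeyAux code.toList "").1

def pvKeyNum (code : String) : Int :=
  let suffix := String.ofList (pvSortKeyAux code.toList "").2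
  if PySem.Str.strIsdigit suffix then (PySem.Int.ofStr? suffix).getD 0 else 1000000000

-- sorted(cs, key=level_code_sort_key): the 3-tuple key (group, num, code) is ported as two stable
-- passes — by (num, code), then by group — exact because PySem.List.sorted/sorted2 are stable.
def pvSortCodes (cs : List String) : List String :=
  PySem.List.sorted (PySem.List.sorted2 cs pvKeyNum (fun c => c) false) pvKeyGroup false

def repeated_rows_for_segment (level_ids : List String) (item_lists_by_level : List (String × List String)) (level_to_group_id : List (String × String)) (level_to_group_pos : List (String × Int)) : List (String × Int × List String) :=
  let ill : PySem.Dict String (List String) := PySem.Dict.mk item_lists_by_level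
  let gid : PySem.Dict String String := PySem.Dict.mk level_to_group_id
  let gpos : PySem.Dict String Int := PySem.Dict.mk level_to_group_pos
  let st := level_ids.foldl (fun st level_id =>
      let items := ill.getD level_id []
      if items.isEmpty then st
      else
        let code := pvLevelCode level_id gid gpos
        items.foldl (fun st item =>
          (st.1.modify item 0 (· + 1), st.2.modify item PySem.Set.empty (fun s => PySem.Set.add s code))) st)
    ((PySem.Dict.empty, PySem.Dict.empty) : PySem.Dict String Int × PySem.Dict String (PySem.Set String))
  let rows := (st.1.items.filter (fun p => decide (1 < p.2))).map
      (fun p => (p.1, p.2, pvSortCodes (st.2.getD p.1 PySem.Set.empty)))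
  PySem.List.sorted2 rows (fun r => -r.2.1) (fun r => r.1) false


-- ===== PORT B =====
def repeated_rows_for_segment_alt (level_ids : List String) (item_lists_by_level : List (String × List String)) (level_to_group_id : List (String × String)) (level_to_group_pos : List (String × Int)) : List (String × Int × List String) :=
  let ill : PySem.Dict String (List String) := PySem.Dict.mk item_lists_by_level
  let gid : PySem.Dict String String := PySem.Dict.mk level_to_group_id
  let gpos : PySem.Dict String Int := PySem.Dict.mk level_to_group_pos
  -- occ.append((item, code)) over both loops
  let occ := level_ids.foldl (fun acc level_id =>
      let code := pvLevelCode level_id gid gpos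
      (ill.getD level_id []).foldl (fun acc item => acc ++ [(item, code)]) acc) ([] : List (String × String))
  let items := occ.map (fun p => p.1)
  -- for idx, (item, _code) in enumerate(occ): …  (items.index never raises here: item ∈ items)
  let rows := (PySem.List.enumerate occ 0).foldl (fun rows p =>
      if (PySem.List.index? items p.2.1).map (fun n => (n : Int)) ≠ some p.1 then rows
      else
        let count := PySem.List.count items p.2.1
        if 1 < count then
          let codes := occ.foldl (fun codes q =>
              if q.1 == p.2.1 then (if codes.contains q.2 then codes else codes ++ [q.2]) else codes)
            ([] : List String)
          rows ++ [(p.2.1, (count : Int), pvSortCodes codes)]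
        else rows)
    ([] : List (String × Int × List String))
  PySem.List.sorted2 rows (fun r => -r.2.1) (fun r => r.1) false


-- ===== PRECONDITION & SPEC =====
def Spec_repeated_rows_for_segment (level_ids : List String) (item_lists_by_level : List (String × List String)) (level_to_group_id : List (String × String)) (level_to_group_pos : List (String × Int)) (out : List (String × Int × List String)) : Prop := out = repeated_rows_for_segment_alt level_ids item_lists_by_level level_to_group_id level_to_group_pos
instance (level_ids : List String) (item_lists_by_level : List (String × List String)) (level_to_group_id : List (String × String)) (level_to_group_pos : List (String × Int)) (out : List (String × Int × List String)) : Decidable (Spec_repeated_rows_for_segment level_ids item_lists_by_level level_to_group_id level_to_group_pos out) := by unfold Spec_repeated_rows_for_segment; infer_instance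

-- ===== CLAIM (what is proved, stated in full; the proofs are below) =====
def Claim_equal_repeated_rows_for_segment : Prop := ∀ (level_ids : List String) (item_lists_by_level : List (String × List String)) (level_to_group_id : List (String × String)) (level_to_group_pos : List (String × Int)), Dom_repeated_rows_for_segment level_ids item_lists_by_level level_to_group_id level_to_group_pos → Spec_repeated_rows_for_segment level_ids item_lists_by_level level_to_group_id level_to_group_pos (repeated_rows_for_segment level_ids item_lists_by_level level_to_group_id level_to_group_pos)

-- ===== LEMMAS AND PROOFS =====

-- flattened occurrence stream (item, code), as B builds it
def pvPairs (I : PySem.Dict String (List String)) (G : PySem.Dict String String) (P : PySem.Dict String Int) (level_ids : List String) : List (String × String) :=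
  level_ids.flatMap (fun lid => (I.getD lid []).map (fun it => (it, pvLevelCode lid G P)))

-- A's guarded nested level/item loop is the fold of the pair step over the flattened pairs
theorem pv_A_fold_eq (I : PySem.Dict String (List String)) (G : PySem.Dict String String)
    (P : PySem.Dict String Int) :
    ∀ (level_ids : List String) (st : PySem.Dict String Int × PySem.Dict String (PySem.Set String)),
      level_ids.foldl (fun st level_id =>
        let items := I.getD level_id []
        if items.isEmpty then st
        else
          let code := pvLevelCode level_id G P
          items.foldl (fun st item =>
            (st.1.modify item 0 (· + 1), st.2.modify item PySem.Set.empty (fun s => PySem.Set.add s code))) st) st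
      = (pvPairs I G P level_ids).foldl (fun st p =>
          (st.1.modify p.1 0 (· + 1), st.2.modify p.1 PySem.Set.empty (fun s => PySem.Set.add s p.2))) st := by
  intro level_ids
  induction level_ids with
  | nil => intro st; rfl
  | cons lid t ih =>
    intro st
    simp only [List.foldl_cons, pvPairs, List.flatMap_cons, List.foldl_append, List.foldl_map]
    rw [← pvPairs]
    rw [← ih]
    by_cases h : (I.getD lid []).isEmpty
    · simp [List.isEmpty_iff.mp h]
    · simp [h]

-- B's occurrence-building loop is the same flattened pair stream
theorem pv_B_occ_eq (I : PySem.Dict String (List String)) (G : PySem.Dict String String)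
    (P : PySem.Dict String Int) :
    ∀ (level_ids : List String) (acc : List (String × String)),
      level_ids.foldl (fun acc lid =>
          let code := pvLevelCode lid G P
          (I.getD lid []).foldl (fun acc item => acc ++ [(item, code)]) acc) acc
      = acc ++ pvPairs I G P level_ids := by
  intro level_ids
  induction level_ids with
  | nil => intro acc; simp [pvPairs]
  | cons lid t ih =>
    intro acc
    simp only [List.foldl_cons]
    rw [PySem.List.foldl_append_singleton_eq_map, ih]
    simp [pvPairs, List.flatMap_cons]

-- the per-item set of codes that A maintains, read back from the dict-of-sets
theorem pv_getD_set_add (c : String) :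
    ∀ (l : List (String × String)) (d : PySem.Dict String (PySem.Set String)),
      (l.foldl (fun d p => d.modify p.1 PySem.Set.empty (fun s => PySem.Set.add s p.2)) d).getD c PySem.Set.empty
      = PySem.Set.update (d.getD c PySem.Set.empty) ((l.filter (fun p => p.1 == c)).map (·.2)) := by
  intro l
  induction l with
  | nil => intro d; rfl
  | cons p t ih =>
    intro d
    simp only [List.foldl_cons]
    rw [ih]
    by_cases h : p.1 = c
    · subst h
      simp [PySem.Dict.getD_modify_self, PySem.Set.update]
    · rw [PySem.Dict.getD_modify_of_ne _ _ _ (Ne.symm h)]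
      simp [h]

-- B's inner codes loop = set(codes of this item), in first-occurrence order
theorem pv_codes_fold (occ : List (String × String)) (k : String) :
    occ.foldl (fun codes q =>
        if q.1 == k then (if codes.contains q.2 then codes else codes ++ [q.2]) else codes) ([] : List String)
    = PySem.Set.ofList ((occ.filter (fun q => q.1 == k)).map (·.2)) := by
  rw [PySem.List.foldl_if_eq_foldl_filter]
  rw [← PySem.Set.update_nil_left, PySem.Set.update_map_eq_foldl_add]
  rfl

-- folding Set.add over t starting from s appends the new elements of t in first-occurrence order
theorem pv_foldl_set_add :
    ∀ (t : List String) (s : PySem.Set String),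
      t.foldl PySem.Set.add s = s ++ (PySem.Set.ofList t).filter (fun x => !decide (x ∈ s)) := by
  intro t
  induction t with
  | nil => intro s; simp [PySem.Set.ofList]
  | cons x t ih =>
    intro s
    have hbase : PySem.Set.add ([] : PySem.Set String) x = [x] := rfl
    have hx : PySem.Set.ofList (x :: t)
        = [x] ++ (PySem.Set.ofList t).filter (fun y => !decide (y ∈ ([x] : List String))) := by
      show (x :: t).foldl PySem.Set.add [] = _
      rw [List.foldl_cons, hbase, ih]
    rw [List.foldl_cons, ih, hx]
    simp only [List.filter_append]
    by_cases h : x ∈ s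
    · have hadd : PySem.Set.add s x = s := by
        simp [PySem.Set.add, PySem.Set.contains, List.contains_eq_mem, h]
      have h1 : List.filter (fun y => !decide (y ∈ s)) [x] = [] := by simp [h]
      rw [hadd, h1, List.nil_append, List.filter_filter]
      congr 1
      apply List.filter_congr
      intro y _
      by_cases hyx : y = x
      · subst hyx; simp [h]
      · simp [hyx]
    · have hadd : PySem.Set.add s x = s ++ [x] := by
        simp [PySem.Set.add, PySem.Set.contains, List.contains_eq_mem, h]
      have h1 : List.filter (fun y => !decide (y ∈ s)) [x] = [x] := by simp [h]
      rw [hadd, h1, List.append_assoc, List.filter_filter]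
      congr 2
      apply List.filter_congr
      intro y _
      by_cases hyx : y = x
      · subst hyx; simp [h]
      · simp [hyx, List.mem_append]

theorem pv_ofList_cons (a : String) (t : List String) :
    PySem.Set.ofList (a :: t) = a :: (PySem.Set.ofList t).filter (fun x => !decide (x = a)) := by
  show (a :: t).foldl PySem.Set.add [] = _
  have hbase : PySem.Set.add ([] : PySem.Set String) a = [a] := rfl
  rw [List.foldl_cons, hbase, pv_foldl_set_add]
  simp

-- enumerate commutes with map on the elements
theorem pv_enumerate_map {α β : Type} (f : α → β) :
    ∀ (l : List α) (s : Int),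
      PySem.List.enumerate (l.map f) s = (PySem.List.enumerate l s).map (fun p => (p.1, f p.2)) := by
  intro l
  induction l with
  | nil => intro s; simp [PySem.List.enumerate_nil]
  | cons x t ih => intro s; simp [PySem.List.enumerate_cons, ih]

-- the first-occurrence filter over enumerate(l) yields exactly set(l) (with any extra predicate P)
theorem pv_firstOcc_aux (P : String → Bool) :
    ∀ (l pre : List String),
      ((PySem.List.enumerate l (pre.length : Int)).filter
          (fun p => ((PySem.List.index? (pre ++ l) p.2).map (fun n => (n : Int)) == some p.1) && P p.2)).map (·.2)
      = (PySem.Set.ofList l).filter (fun x => !pre.contains x && P x) := by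
  intro l
  induction l with
  | nil => intro pre; simp [PySem.List.enumerate_nil, PySem.Set.ofList]
  | cons a t ih =>
    intro pre
    rw [PySem.List.enumerate_cons]
    have htail :
        PySem.List.enumerate t ((pre.length : Int) + 1) = PySem.List.enumerate t ((pre ++ [a]).length : Int) := by
      simp
    have hlist : pre ++ a :: t = (pre ++ [a]) ++ t := by simp
    have hhead : ((PySem.List.index? (pre ++ a :: t) a).map (fun n => (n : Int)) == some (pre.length : Int))
        = !pre.contains a := by
      by_cases h : a ∈ pre
      · rcases hkk : PySem.List.index? pre a with _ | k
        · exact absurd ((PySem.List.index?_eq_none_iff pre a).mp hkk) (by simpa using h)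
        · have hidx : PySem.List.index? (pre ++ a :: t) a = some k := by
            rw [PySem.List.index?_append_of_mem _ h, hkk]
          obtain ⟨hklt, -, -⟩ := PySem.List.getElem_of_index?_eq_some hkk
          have hne : (k : Int) ≠ (pre.length : Int) := by omega
          rw [hidx]
          simp [hne, List.contains_eq_mem, h]
      · have hidx : PySem.List.index? (pre ++ a :: t) a = some pre.length := by
          rw [PySem.List.index?_eq_some_iff]
          exact ⟨pre, t, rfl, rfl, h⟩
        rw [hidx]
        simp [List.contains_eq_mem, h]
    rw [List.filter_cons]
    have hcondtail :
        ((PySem.List.enumerate t ((pre ++ [a]).length : Int)).filter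
          (fun p => ((PySem.List.index? ((pre ++ [a]) ++ t) p.2).map (fun n => (n : Int)) == some p.1) && P p.2)).map (·.2)
        = (PySem.Set.ofList t).filter (fun x => !(pre ++ [a]).contains x && P x) := ih (pre ++ [a])
    rw [pv_ofList_cons]
    rw [List.filter_cons]
    by_cases hP : (!pre.contains a && P a) = true
    · have hc : (((PySem.List.index? (pre ++ a :: t) a).map (fun n => (n : Int)) == some (pre.length : Int)) && P a) = true := by
        rw [hhead]; rw [Bool.and_comm] at hP; rw [Bool.and_comm]; exact hP
      simp only [hc, hP, if_true]
      rw [List.map_cons]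
      congr 1
      · rw [htail]
        conv_lhs => rw [show pre ++ a :: t = (pre ++ [a]) ++ t by simp]
        rw [hcondtail]
        rw [List.filter_filter]
        apply List.filter_congr
        intro y _
        simp only [List.contains_eq_mem, List.mem_append, List.mem_singleton]
        by_cases hya : y = a <;> simp [hya]
    · have hc : (((PySem.List.index? (pre ++ a :: t) a).map (fun n => (n : Int)) == some (pre.length : Int)) && P a) = false := by
        rw [hhead]; rw [Bool.and_comm]; rw [Bool.and_comm] at hP; simpa using hP
      simp only [hc, hP, if_false, Bool.false_eq_true]
      rw [htail]
      conv_lhs => rw [show pre ++ a :: t = (pre ++ [a]) ++ t by simp]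
      rw [hcondtail]
      rw [List.filter_filter]
      apply List.filter_congr
      intro y _
      simp only [List.contains_eq_mem, List.mem_append, List.mem_singleton]
      by_cases hya : y = a <;> simp [hya]

theorem pv_firstOcc (P : String → Bool) (l : List String) :
    ((PySem.List.enumerate l 0).filter
        (fun p => ((PySem.List.index? l p.2).map (fun n => (n : Int)) == some p.1) && P p.2)).map (·.2)
    = (PySem.Set.ofList l).filter P := by
  have := pv_firstOcc_aux P l []
  simpa using this

-- the main identity: A's pre-sort row list equals B's pre-sort row list
theorem pv_main (I : PySem.Dict String (List String)) (G : PySem.Dict String String)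
    (P : PySem.Dict String Int) (level_ids : List String) :
    (((level_ids.foldl (fun st level_id =>
        let items := I.getD level_id []
        if items.isEmpty then st
        else
          let code := pvLevelCode level_id G P
          items.foldl (fun st item =>
            (st.1.modify item 0 (· + 1), st.2.modify item PySem.Set.empty (fun s => PySem.Set.add s code))) st)
      ((PySem.Dict.empty, PySem.Dict.empty) : PySem.Dict String Int × PySem.Dict String (PySem.Set String))).1.items.filter
        (fun p => decide (1 < p.2))).map
        (fun p => (p.1, p.2, pvSortCodes ((level_ids.foldl (fun st level_id =>
          let items := I.getD level_id []
          if items.isEmpty then st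
          else
            let code := pvLevelCode level_id G P
            items.foldl (fun st item =>
              (st.1.modify item 0 (· + 1), st.2.modify item PySem.Set.empty (fun s => PySem.Set.add s code))) st)
        ((PySem.Dict.empty, PySem.Dict.empty) : PySem.Dict String Int × PySem.Dict String (PySem.Set String))).2.getD p.1 PySem.Set.empty))))
    = (PySem.List.enumerate (pvPairs I G P level_ids) 0).foldl (fun rows p =>
        if (PySem.List.index? ((pvPairs I G P level_ids).map (fun q => q.1)) p.2.1).map (fun n => (n : Int)) ≠ some p.1 then rows
        else
          let count := PySem.List.count ((pvPairs I G P level_ids).map (fun q => q.1)) p.2.1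
          if 1 < count then
            let codes := (pvPairs I G P level_ids).foldl (fun codes q =>
                if q.1 == p.2.1 then (if codes.contains q.2 then codes else codes ++ [q.2]) else codes)
              ([] : List String)
            rows ++ [(p.2.1, (count : Int), pvSortCodes codes)]
          else rows)
      ([] : List (String × Int × List String)) := by
  rw [pv_A_fold_eq]
  set pairs := pvPairs I G P level_ids with hp
  set itemsL := pairs.map (fun q => q.1) with hitems
  -- A side: split the two accumulators, read off the counter and the sets
  rw [PySem.List.foldl_prod_mk
      (f := fun (d : PySem.Dict String Int) (p : String × String) => d.modify p.1 0 (· + 1))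
      (g := fun (d : PySem.Dict String (PySem.Set String)) (p : String × String) =>
        d.modify p.1 PySem.Set.empty (fun s => PySem.Set.add s p.2))]
  simp only []
  have hc : pairs.foldl (fun d p => d.modify p.1 0 (· + 1)) PySem.Dict.empty
      = PySem.Dict.counter itemsL := by
    rw [PySem.Dict.counter_eq_foldl, hitems, List.foldl_map]
  have hS : ∀ k, (pairs.foldl (fun d p => d.modify p.1 PySem.Set.empty (fun s => PySem.Set.add s p.2))
      PySem.Dict.empty).getD k PySem.Set.empty
      = PySem.Set.ofList ((pairs.filter (fun p => p.1 == k)).map (·.2)) := by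
    intro k
    rw [pv_getD_set_add]
    simp [PySem.Set.update_nil_left]
  rw [hc, PySem.Dict.items_counter]
  -- B side: the fold is a filter-map over enumerate(pairs)
  have hstep : (PySem.List.enumerate pairs 0).foldl (fun rows p =>
        if (PySem.List.index? itemsL p.2.1).map (fun n => (n : Int)) ≠ some p.1 then rows
        else
          let count := PySem.List.count itemsL p.2.1
          if 1 < count then
            let codes := pairs.foldl (fun codes q =>
                if q.1 == p.2.1 then (if codes.contains q.2 then codes else codes ++ [q.2]) else codes)
              ([] : List String)
            rows ++ [(p.2.1, (count : Int), pvSortCodes codes)]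
          else rows)
      ([] : List (String × Int × List String))
      = ((PySem.List.enumerate pairs 0).filter
          (fun p => ((PySem.List.index? itemsL p.2.1).map (fun n => (n : Int)) == some p.1)
            && decide (1 < PySem.List.count itemsL p.2.1))).map
          (fun p => (p.2.1, (PySem.List.count itemsL p.2.1 : Int),
            pvSortCodes (pairs.foldl (fun codes q =>
              if q.1 == p.2.1 then (if codes.contains q.2 then codes else codes ++ [q.2]) else codes) []))) := by
    rw [PySem.List.foldl_congr_mem
        (g := fun rows p =>
          if (((PySem.List.index? itemsL p.2.1).map (fun n => (n : Int)) == some p.1)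
              && decide (1 < PySem.List.count itemsL p.2.1)) = true
          then rows ++ [(p.2.1, (PySem.List.count itemsL p.2.1 : Int),
            pvSortCodes (pairs.foldl (fun codes q =>
              if q.1 == p.2.1 then (if codes.contains q.2 then codes else codes ++ [q.2]) else codes) []))]
          else rows)]
    · rw [PySem.List.foldl_append_if, List.nil_append]
    · intro acc x _
      by_cases h1 : (PySem.List.index? itemsL x.2.1).map (fun n => (n : Int)) = some x.1
      · rw [if_neg (not_not_intro h1)]
        by_cases h2 : 1 < PySem.List.count itemsL x.2.1
        · rw [if_pos h2, if_pos (by rw [Bool.and_eq_true, beq_iff_eq]; exact ⟨h1, by simpa using h2⟩)]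
        · rw [if_neg h2, if_neg (by rw [Bool.and_eq_true]; rintro ⟨-, hd⟩; exact h2 (by simpa using hd))]
      · rw [if_pos h1, if_neg (by rw [Bool.and_eq_true, beq_iff_eq]; rintro ⟨he, -⟩; exact h1 he)]
  rw [hstep]
  -- replace enumerate(pairs) by enumerate(itemsL): both pred and row depend only on (index, item)
  have hproj : (PySem.List.enumerate itemsL 0) = (PySem.List.enumerate pairs 0).map (fun p => (p.1, p.2.1)) := by
    rw [hitems, pv_enumerate_map]
  have hswap :
      ((PySem.List.enumerate pairs 0).filter
          (fun p => ((PySem.List.index? itemsL p.2.1).map (fun n => (n : Int)) == some p.1)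
            && decide (1 < PySem.List.count itemsL p.2.1))).map
          (fun p => (p.2.1, (PySem.List.count itemsL p.2.1 : Int),
            pvSortCodes (pairs.foldl (fun codes q =>
              if q.1 == p.2.1 then (if codes.contains q.2 then codes else codes ++ [q.2]) else codes) [])))
      = (((PySem.List.enumerate itemsL 0).filter
          (fun p => ((PySem.List.index? itemsL p.2).map (fun n => (n : Int)) == some p.1)
            && decide (1 < PySem.List.count itemsL p.2))).map (·.2)).map
          (fun k => (k, (PySem.List.count itemsL k : Int),
            pvSortCodes (pairs.foldl (fun codes q =>
              if q.1 == k then (if codes.contains q.2 then codes else codes ++ [q.2]) else codes) []))) := by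
    rw [hproj, List.filter_map, List.map_map, List.map_map]
    rfl
  rw [hswap]
  rw [pv_firstOcc (fun x => decide (1 < PySem.List.count itemsL x)) itemsL]
  -- now both sides are maps over (a filter of) set(itemsL); align filter and map
  rw [List.filter_map, List.map_map]
  have hpred : List.filter ((fun (p : String × Int) => decide (1 < p.2)) ∘ fun k => (k, ((itemsL.count k : Nat) : Int))) (PySem.Set.ofList itemsL)
      = List.filter (fun x => decide (1 < PySem.List.count itemsL x)) (PySem.Set.ofList itemsL) := by
    apply List.filter_congr
    intro k _
    simp [PySem.List.count_eq, Nat.one_lt_cast]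
  rw [hpred]
  apply List.map_congr_left
  intro k hk
  simp only [Function.comp]
  rw [hS k, pv_codes_fold pairs k, PySem.List.count_eq]

-- ===== VERDICT (by name: the statement is the Claim_ definition above) =====
theorem repeated_rows_for_segment_spec : Claim_equal_repeated_rows_for_segment := by
  intro level_ids ill gid gpos _
  unfold Spec_repeated_rows_for_segment repeated_rows_for_segment repeated_rows_for_segment_alt
  simp only []
  rw [pv_B_occ_eq (PySem.Dict.mk ill) (PySem.Dict.mk gid) (PySem.Dict.mk gpos) level_ids []]
  rw [List.nil_append]
  rw [pv_main (PySem.Dict.mk ill) (PySem.Dict.mk gid) (PySem.Dict.mk gpos) level_ids]
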